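-- pv_equiv track=rewrite | github.com/kiwibrowser/src | third_party/blink/tools/blinkpy/common/pretty_diff.py | _find_operations
-- ===== SOURCE A (Python) =====
-- def _find_operations(lines):
--     """Finds 'operations' in the hunk.
--
--     A hunk contains one or more operations, and an operation is one of the
--     followings:
--       - Replace operation: '-' lines, followed by '+' lines
--       - Delete operation: '-' lines, not followed by '+' lines
--       - Insertion operation: '+' lines
--     """
--     # List of tuples which consist of (list of '-' line index, list of '+' line index)
--     operations = []
--     inserted_index = []
--     deleted_index = []
--     for i, line in enumerate(lines):
--         if line[0] == ' ':
--             if deleted_index or inserted_index: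
--                 operations.append((deleted_index, inserted_index))
--                 deleted_index = []
--                 inserted_index = []
--         elif line[0] == '-':
--             if inserted_index:
--                 operations.append((deleted_index, inserted_index))
--                 deleted_index = []
--                 inserted_index = []
--             deleted_index.append(i)
--         else:
--             assert line[0] == '+'
--             inserted_index.append(i)
--     if deleted_index or inserted_index:
--         operations.append((deleted_index, inserted_index))
--     return operations
-- ===== SOURCE B (Python) =====
-- import re
--
--
-- def _find_operations(lines):
--     # One string of leading characters; position in s == line index.
--     s = ''.join(line[0] for line in lines)
--     assert not (set(s) - set(' -+'))
--     operations = []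
--     for m in re.finditer(r'\++|-+\+*', s):
--         k = m.start() + m.group().count('-')  # '-'s precede '+'s in a match
--         operations.append((list(range(m.start(), k)), list(range(k, m.end()))))
--     return operations
-- ===== Notes on version B (the rewrite author's own statement) =====
-- stated objective: alternative
-- what changed: Replaces A's per-line state machine (pending deleted/inserted accumulators with flush-on-' '-or-'-' logic) by a regex scan re.finditer(r'\++|-+\+*') over the string of leading characters, where each match span directly yields one operation's index ranges.
import Mathlib
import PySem

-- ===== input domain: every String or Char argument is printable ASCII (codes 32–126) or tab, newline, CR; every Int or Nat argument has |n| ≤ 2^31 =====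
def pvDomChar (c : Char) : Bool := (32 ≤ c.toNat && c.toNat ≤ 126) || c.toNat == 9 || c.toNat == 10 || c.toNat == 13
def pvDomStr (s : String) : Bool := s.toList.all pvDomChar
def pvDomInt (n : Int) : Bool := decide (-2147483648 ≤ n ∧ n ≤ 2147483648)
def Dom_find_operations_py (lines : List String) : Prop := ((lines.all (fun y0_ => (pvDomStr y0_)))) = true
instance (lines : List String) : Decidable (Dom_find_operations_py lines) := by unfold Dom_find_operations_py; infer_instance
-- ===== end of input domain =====

-- B replaces A's accumulator/flush state machine by a regex-style scan of the leading-character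
-- string, emitting each maximal '-'-run-then-'+'-run as one operation (alternative decomposition).


-- ===== PORT A =====
-- the for-loop of _find_operations: state (operations, deleted_index, inserted_index), index i
def loopA (ops : List (List Int × List Int)) (del ins : List Int) (i : Int) :
    List String → List (List Int × List Int)
  | [] => if del.isEmpty && ins.isEmpty then ops else ops ++ [(del, ins)]
  | line :: rest =>
    match PySem.Str.pyGet? line 0 with
    | none => ops          -- line[0] raises IndexError (excluded by Pre_)
    | some c =>
      if c = ' ' then
        if del.isEmpty && ins.isEmpty then loopA ops del ins (i + 1) rest
        else loopA (ops ++ [(del, ins)]) [] [] (i + 1) rest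
      else if c = '-' then
        if ins.isEmpty then loopA ops (del ++ [i]) ins (i + 1) rest
        else loopA (ops ++ [(del, ins)]) [i] [] (i + 1) rest
      else if c = '+' then loopA ops del (ins ++ [i]) (i + 1) rest
      else ops             -- assert fails: AssertionError (excluded by Pre_)

def find_operations_py (lines : List String) : List (List Int × List Int) :=
  loopA [] [] [] 0 lines

-- ===== PORT B =====
-- takeRun ch i cs: the maximal leading run of ch (its index list, the index after it, the rest);
-- this is what one greedy regex atom '-+' / '\++' consumes at position i of s.
def takeRun (ch : Char) (i : Int) : List Char → List Int × Int × List Char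
  | [] => ([], i, [])
  | c :: rest =>
    if c = ch then
      let t := takeRun ch (i + 1) rest
      (i :: t.1, t.2)
    else ([], i, c :: rest)

theorem takeRun_len_le (ch : Char) (i : Int) (cs : List Char) :
    (takeRun ch i cs).2.2.length ≤ cs.length := by
  induction cs generalizing i with
  | nil => simp [takeRun]
  | cons c rest ih =>
    by_cases h : c = ch
    · simp only [takeRun, if_pos h]
      exact le_trans (ih (i + 1)) (Nat.le_succ _)
    · simp [takeRun, h]

theorem takeRun_cons_self (ch : Char) (i : Int) (rest : List Char) :
    (takeRun ch i (ch :: rest)).2.2.length ≤ rest.length := by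
  simp only [takeRun, if_pos rfl]
  exact takeRun_len_le ch (i + 1) rest

-- each re.finditer match of r'\++|-+\+*' on s, scanned left to right; spaces separate matches
def loopB (i : Int) (cs : List Char) : List (List Int × List Int) :=
  match cs with
  | [] => []
  | c :: rest =>
    if c = ' ' then loopB (i + 1) rest
    else if h2 : c = '-' then
      let t1 := takeRun '-' i (c :: rest)
      let t2 := takeRun '+' t1.2.1 t1.2.2
      (t1.1, t2.1) :: loopB t2.2.1 t2.2.2
    else if h3 : c = '+' then
      let t1 := takeRun '+' i (c :: rest)
      ([], t1.1) :: loopB t1.2.1 t1.2.2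
    else []                -- assert fails (excluded by Pre_)
  termination_by cs.length
  decreasing_by
  · simp
  · subst h2
    calc (takeRun '+' _ (takeRun '-' i ('-' :: rest)).2.2).2.2.length
        ≤ (takeRun '-' i ('-' :: rest)).2.2.length := takeRun_len_le _ _ _
      _ ≤ rest.length := takeRun_cons_self _ _ _
      _ < ('-' :: rest).length := by simp
  · subst h3
    exact Nat.lt_succ_of_le (takeRun_cons_self _ _ _)

def firstChar (l : String) : Char := (PySem.Str.pyGet? l 0).getD ' '

def find_operations_py_alt (lines : List String) : List (List Int × List Int) :=
  loopB 0 (lines.map firstChar)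

-- ===== PRECONDITION & SPEC =====
-- Pre_ excludes exactly the inputs on which A raises: an empty line (IndexError from line[0])
-- or a line whose first character is not ' ', '-' or '+' (AssertionError).
def Pre_find_operations_py (lines : List String) : Prop :=
  ∀ l ∈ lines, PySem.Str.pyGet? l 0 = some ' ' ∨ PySem.Str.pyGet? l 0 = some '-' ∨
    PySem.Str.pyGet? l 0 = some '+'
instance (lines : List String) : Decidable (Pre_find_operations_py lines) := by
  unfold Pre_find_operations_py; infer_instance

def pvWitness_find_operations_py : List String := [" a", "-b", "-c", "+d", "+e", " f", "+g"]

def Spec_find_operations_py (lines : List String) (out : List (List Int × List Int)) : Prop := out = find_operations_py_alt lines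
instance (lines : List String) (out : List (List Int × List Int)) : Decidable (Spec_find_operations_py lines out) := by unfold Spec_find_operations_py; infer_instance

-- ===== CLAIM (what is proved, stated in full; the proofs are below) =====
def Claim_equal_find_operations_py : Prop := ∀ (lines : List String), Dom_find_operations_py lines → Pre_find_operations_py lines → Spec_find_operations_py lines (find_operations_py lines)

-- ===== LEMMAS AND PROOFS =====

-- A's loop over the lines equals the same loop over the leading characters (loopA')
def loopA' (ops : List (List Int × List Int)) (del ins : List Int) (i : Int) :
    List Char → List (List Int × List Int)
  | [] => if del.isEmpty && ins.isEmpty then ops else ops ++ [(del, ins)]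
  | c :: rest =>
    if c = ' ' then
      if del.isEmpty && ins.isEmpty then loopA' ops del ins (i + 1) rest
      else loopA' (ops ++ [(del, ins)]) [] [] (i + 1) rest
    else if c = '-' then
      if ins.isEmpty then loopA' ops (del ++ [i]) ins (i + 1) rest
      else loopA' (ops ++ [(del, ins)]) [i] [] (i + 1) rest
    else if c = '+' then loopA' ops del (ins ++ [i]) (i + 1) rest
    else ops

theorem loopA_eq_loopA' (lines : List String) (h : Pre_find_operations_py lines)
    (ops : List (List Int × List Int)) (del ins : List Int) (i : Int) :
    loopA ops del ins i lines = loopA' ops del ins i (lines.map firstChar) := by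
  induction lines generalizing ops del ins i with
  | nil => rfl
  | cons l rest ih =>
    have hl := h l (by simp)
    have hrest : Pre_find_operations_py rest := fun x hx => h x (by simp [hx])
    have hsome : ∃ c, PySem.Str.pyGet? l 0 = some c := by
      rcases hl with h1 | h1 | h1 <;> exact ⟨_, h1⟩
    obtain ⟨c, hc⟩ := hsome
    simp only [loopA, List.map, loopA', hc, firstChar, Option.getD_some]
    split_ifs <;> first | rfl | exact ih hrest _ _ _ _

def okChars (cs : List Char) : Prop := ∀ c ∈ cs, c = ' ' ∨ c = '-' ∨ c = '+'

theorem takeRun_mem (ch : Char) (i : Int) (cs : List Char) :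
    ∀ c ∈ (takeRun ch i cs).2.2, c ∈ cs := by
  induction cs generalizing i with
  | nil => simp [takeRun]
  | cons c rest ih =>
    by_cases h : c = ch
    · simp only [takeRun, if_pos h]
      intro x hx
      exact List.mem_cons_of_mem _ (ih (i + 1) x hx)
    · simp [takeRun, h]

theorem takeRun_head_ne (ch : Char) (i : Int) (cs : List Char) :
    (takeRun ch i cs).2.2.head? ≠ some ch := by
  induction cs generalizing i with
  | nil => simp [takeRun]
  | cons c rest ih =>
    by_cases h : c = ch
    · simp only [takeRun, if_pos h]; exact ih (i + 1)
    · simp [takeRun, h, Ne.symm h]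

theorem takeRun_fst_nil (ch : Char) (i : Int) (cs : List Char)
    (h : (takeRun ch i cs).1 = []) : (takeRun ch i cs).2.2 = cs := by
  cases cs with
  | nil => rfl
  | cons c rest =>
    by_cases hc : c = ch
    · simp [takeRun, hc] at h
    · simp [takeRun, hc]

-- loopA' absorbs a maximal '+' run into inserted_index
theorem loopA'_plus (cs : List Char) (ops : List (List Int × List Int))
    (del ins : List Int) (i : Int) :
    loopA' ops del ins i cs =
      loopA' ops del (ins ++ (takeRun '+' i cs).1) (takeRun '+' i cs).2.1
        (takeRun '+' i cs).2.2 := by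
  induction cs generalizing ins i with
  | nil => simp [takeRun]
  | cons c rest ih =>
    by_cases h : c = '+'
    · subst h
      simp only [takeRun, if_pos rfl]
      have : loopA' ops del ins i ('+' :: rest) = loopA' ops del (ins ++ [i]) (i + 1) rest := by
        simp [loopA']
      rw [this, ih (ins ++ [i]) (i + 1)]
      simp
    · simp [takeRun, h]

-- with inserted_index empty, loopA' absorbs a maximal '-' run into deleted_index
theorem loopA'_minus (cs : List Char) (ops : List (List Int × List Int))
    (del : List Int) (i : Int) :
    loopA' ops del [] i cs =
      loopA' ops (del ++ (takeRun '-' i cs).1) [] (takeRun '-' i cs).2.1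
        (takeRun '-' i cs).2.2 := by
  induction cs generalizing del i with
  | nil => simp [takeRun]
  | cons c rest ih =>
    by_cases h : c = '-'
    · subst h
      simp only [takeRun, if_pos rfl]
      have : loopA' ops del [] i ('-' :: rest) = loopA' ops (del ++ [i]) [] (i + 1) rest := by
        simp [loopA']
      rw [this, ih (del ++ [i]) (i + 1)]
      simp
    · simp [takeRun, h]

-- main invariant: from a clean state, A's state machine produces exactly B's matches
theorem loopA'_eq_loopB (n : Nat) : ∀ cs : List Char, cs.length ≤ n → okChars cs →
    ∀ (i : Int) (ops : List (List Int × List Int)),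
      loopA' ops [] [] i cs = ops ++ loopB i cs := by
  induction n with
  | zero =>
    intro cs hlen _ i ops
    have : cs = [] := List.length_eq_zero_iff.mp (Nat.le_zero.mp hlen)
    subst this
    simp [loopA', loopB]
  | succ n ih =>
    intro cs hlen hok i ops
    -- flush step: nonempty pending operation, next char (if any) is ' ' or a '-' with ins ≠ []
    have flush : ∀ (r : List Char), r.length ≤ n → okChars r →
        ∀ (del ins : List Int) (j : Int), (del.isEmpty && ins.isEmpty) = false →
          r.head? ≠ some '+' → (r.head? = some '-' → ins ≠ []) →
          loopA' ops del ins j r = ops ++ [(del, ins)] ++ loopB j r := by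
      intro r hr hokr del ins j hne hplus hminus
      cases r with
      | nil => simp [loopA', loopB, hne]
      | cons c r3 =>
        rcases hokr c (by simp) with hc | hc | hc
        · subst hc
          have h1 : loopA' ops del ins j (' ' :: r3) =
              loopA' (ops ++ [(del, ins)]) [] [] (j + 1) r3 := by
            simp [loopA', hne]
          rw [h1, ih r3 (by simpa using Nat.le_trans (Nat.le_succ _) hr)
            (fun x hx => hokr x (by simp [hx])) (j + 1) _]
          simp [loopB]
        · subst hc
          have hins : ins ≠ [] := hminus rfl
          have hins' : ins.isEmpty = false := by simpa [List.isEmpty_iff] using hins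
          have h1 : loopA' ops del ins j ('-' :: r3) =
              loopA' (ops ++ [(del, ins)]) [j] [] (j + 1) r3 := by
            simp [loopA', hins']
          have h2 : loopA' (ops ++ [(del, ins)]) [] [] j ('-' :: r3) =
              loopA' (ops ++ [(del, ins)]) [j] [] (j + 1) r3 := by
            simp [loopA']
          rw [h1, ← h2, ih ('-' :: r3) hr hokr j _]
          try simp
        · subst hc; simp at hplus
    cases cs with
    | nil => simp [loopA', loopB]
    | cons c rest =>
      rcases hok c (by simp) with hc | hc | hc
      · subst hc
        have h1 : loopA' ops [] [] i (' ' :: rest) = loopA' ops [] [] (i + 1) rest := by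
          simp [loopA']
        rw [h1, ih rest (by simpa using Nat.lt_succ_iff.mp (Nat.lt_of_lt_of_le (by simp) hlen))
          (fun x hx => hok x (by simp [hx])) (i + 1) ops]
        simp [loopB]
      · subst hc
        set t1 := takeRun '-' i ('-' :: rest) with ht1
        set t2 := takeRun '+' t1.2.1 t1.2.2 with ht2
        have e1 : loopA' ops [] [] i ('-' :: rest) = loopA' ops t1.1 [] t1.2.1 t1.2.2 := by
          simpa using loopA'_minus ('-' :: rest) ops [] i
        have e2 : loopA' ops t1.1 [] t1.2.1 t1.2.2 = loopA' ops t1.1 t2.1 t2.2.1 t2.2.2 := by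
          simpa [← ht2] using loopA'_plus t1.2.2 ops t1.1 [] t1.2.1
        have hdel : t1.1 ≠ [] := by simp [ht1, takeRun]
        have hlen2 : t2.2.2.length ≤ n := by
          have h3 := takeRun_len_le '+' t1.2.1 t1.2.2
          rw [← ht2] at h3
          have h2 := takeRun_cons_self '-' i rest
          simp only [← ht1] at h2
          simp only [List.length_cons] at hlen
          omega
        have hok2 : okChars t2.2.2 := fun x hx =>
          hok x (takeRun_mem '-' i ('-' :: rest) x (takeRun_mem '+' t1.2.1 t1.2.2 x hx))
        have hplus : t2.2.2.head? ≠ some '+' := takeRun_head_ne '+' t1.2.1 t1.2.2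
        have hminus : t2.2.2.head? = some '-' → t2.1 ≠ [] := by
          intro hhd hnil
          have := takeRun_fst_nil '+' t1.2.1 t1.2.2 hnil
          rw [this] at hhd
          exact takeRun_head_ne '-' i ('-' :: rest) (by rw [← ht1]; exact hhd)
        have hne : (t1.1.isEmpty && (t2.1 : List Int).isEmpty) = false := by
          have : t1.1.isEmpty = false := by simpa [List.isEmpty_iff] using hdel
          simp [this]
        rw [e1, e2, flush t2.2.2 hlen2 hok2 t1.1 t2.1 t2.2.1 hne hplus hminus]
        have : loopB i ('-' :: rest) = (t1.1, t2.1) :: loopB t2.2.1 t2.2.2 := by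
          rw [loopB]; simp [← ht1, ← ht2]
        rw [this]; simp
      · subst hc
        set t1 := takeRun '+' i ('+' :: rest) with ht1
        have e1 : loopA' ops [] [] i ('+' :: rest) = loopA' ops [] t1.1 t1.2.1 t1.2.2 := by
          simpa using loopA'_plus ('+' :: rest) ops [] [] i
        have hins : t1.1 ≠ [] := by simp [ht1, takeRun]
        have hlen2 : t1.2.2.length ≤ n := by
          have h2 := takeRun_cons_self '+' i rest
          simp only [← ht1] at h2
          simp only [List.length_cons] at hlen
          omega
        have hok2 : okChars t1.2.2 := fun x hx => hok x (takeRun_mem '+' i ('+' :: rest) x hx)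
        have hplus : t1.2.2.head? ≠ some '+' := takeRun_head_ne '+' i ('+' :: rest)
        have hne : (([] : List Int).isEmpty && t1.1.isEmpty) = false := by
          have : t1.1.isEmpty = false := by simpa [List.isEmpty_iff] using hins
          simp [this]
        rw [e1, flush t1.2.2 hlen2 hok2 [] t1.1 t1.2.1 hne hplus (by simp [hins])]
        have : loopB i ('+' :: rest) = ([], t1.1) :: loopB t1.2.1 t1.2.2 := by
          rw [loopB]; simp [← ht1]
        rw [this]; simp

-- ===== VERDICT (by name: the statement is the Claim_ definition above) =====
theorem find_operations_py_spec : Claim_equal_find_operations_py := by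
  intro lines _ hpre
  unfold Spec_find_operations_py find_operations_py find_operations_py_alt
  rw [loopA_eq_loopA' lines hpre]
  have hok : okChars (lines.map firstChar) := by
    intro c hc
    rcases List.mem_map.mp hc with ⟨l, hl, rfl⟩
    rcases hpre l hl with h | h | h <;> unfold firstChar <;> rw [h] <;> simp
  simpa using loopA'_eq_loopB (lines.map firstChar).length (lines.map firstChar) le_rfl hok 0 []
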